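-- pv_equiv track=rewrite | github.com/paulequilibrio/sway-simple-overlay | timedate-overlay.py | match_monitor_config
-- ===== SOURCE A (Python) =====
-- def match_monitor_config(output_name, configs):
--     for conf in configs:
--         if conf.get("name") == output_name:
--             return conf
--
--     for conf in configs:
--         if conf.get("name") == "default":
--             return conf
--
--     return configs[0]
-- ===== SOURCE B (Python) =====
-- def match_monitor_config(output_name, configs):
--     def rank(conf):
--         name = conf.get("name")
--         if name == output_name:
--             return 0
--         if name == "default":
--             return 1
--         return 2
--     return min(configs, key=rank)
-- ===== Notes on version B (the rewrite author's own statement) =====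
-- stated objective: alternative
-- what changed: Replaces A's two sequential early-return scans plus indexed fallback with a single selection by minimum: each config is given a priority rank (0 = name match, 1 = 'default', 2 = other) and min with that key returns the first config of minimal rank, which is exactly A's choice.
import Mathlib
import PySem

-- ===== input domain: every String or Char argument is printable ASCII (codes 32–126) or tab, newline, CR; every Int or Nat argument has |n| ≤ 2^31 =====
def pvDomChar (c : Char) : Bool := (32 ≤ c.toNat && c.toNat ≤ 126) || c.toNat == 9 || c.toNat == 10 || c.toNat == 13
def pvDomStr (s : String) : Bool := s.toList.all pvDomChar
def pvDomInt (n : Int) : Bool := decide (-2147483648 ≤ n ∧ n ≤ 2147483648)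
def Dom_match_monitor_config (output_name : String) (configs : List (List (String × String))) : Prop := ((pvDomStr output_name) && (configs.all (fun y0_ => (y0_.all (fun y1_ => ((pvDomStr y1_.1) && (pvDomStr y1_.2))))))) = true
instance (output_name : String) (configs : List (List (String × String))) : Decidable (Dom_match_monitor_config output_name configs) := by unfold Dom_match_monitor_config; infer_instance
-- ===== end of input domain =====

-- B replaces A's two early-return scans with a single min-by-priority-rank selection (objective: alternative).
-- ===== PORT A =====
-- first/second loop of A: return the first conf whose "name" key equals target
def pvLoopA (target : String) : List (List (String × String)) → Option (List (String × String))
  | [] => none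
  | c :: rest =>
    if (PySem.Dict.mk c).get? "name" = some target then some c else pvLoopA target rest

def match_monitor_config (output_name : String) (configs : List (List (String × String))) : List (String × String) :=
  match pvLoopA output_name configs with
  | some c => c
  | none =>
    match pvLoopA "default" configs with
    | some c => c
    | none => (PySem.List.pyGet? configs 0).getD []  -- configs[0]; none (IndexError) is excluded by Pre_

-- ===== PORT B =====
-- rank(conf): 0 = name match, 1 = "default", 2 = other
def pvRank (output_name : String) (conf : List (String × String)) : Int :=
  if (PySem.Dict.mk conf).get? "name" = some output_name then 0
  else if (PySem.Dict.mk conf).get? "name" = some "default" then 1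
  else 2

def match_monitor_config_alt (output_name : String) (configs : List (List (String × String))) : List (String × String) :=
  match PySem.List.min? configs (pvRank output_name) with
  | some c => c
  | none => []  -- min([]) raises ValueError in Python; the empty list is excluded by Pre_

-- ===== PRECONDITION & SPEC =====
-- Pre_ excludes only the empty configs list, on which Python A raises IndexError (and B ValueError).
def Pre_match_monitor_config (output_name : String) (configs : List (List (String × String))) : Prop := configs ≠ []
instance (output_name : String) (configs : List (List (String × String))) : Decidable (Pre_match_monitor_config output_name configs) := by unfold Pre_match_monitor_config; infer_instance
def pvWitness_match_monitor_config : String × (List (List (String × String))) := ("eDP-1", [[("name", "default")], [("name", "eDP-1")]])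
def Spec_match_monitor_config (output_name : String) (configs : List (List (String × String))) (out : List (String × String)) : Prop := out = match_monitor_config_alt output_name configs
instance (output_name : String) (configs : List (List (String × String))) (out : List (String × String)) : Decidable (Spec_match_monitor_config output_name configs out) := by unfold Spec_match_monitor_config; infer_instance

-- ===== CLAIM (what is proved, stated in full; the proofs are below) =====
def Claim_equal_match_monitor_config : Prop := ∀ (output_name : String) (configs : List (List (String × String))), Dom_match_monitor_config output_name configs → Pre_match_monitor_config output_name configs → Spec_match_monitor_config output_name configs (match_monitor_config output_name configs)

-- ===== LEMMAS AND PROOFS =====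
-- the running "current minimum" of B's fold, as a recursion on the list
def pvPick (out : String) (m : List (String × String)) : List (List (String × String)) → List (String × String)
  | [] => m
  | x :: r => if pvRank out x < pvRank out m then pvPick out x r else pvPick out m r

-- first element of rank k
def pvFirstRank (out : String) (k : Int) : List (List (String × String)) → Option (List (String × String))
  | [] => none
  | x :: r => if pvRank out x = k then some x else pvFirstRank out k r

theorem pvRank_cases (out : String) (c : List (String × String)) :
    pvRank out c = 0 ∨ pvRank out c = 1 ∨ pvRank out c = 2 := by
  unfold pvRank; split_ifs <;> simp

theorem min?_cons_eq_pick (out : String) (t : List (List (String × String))) (c : List (String × String)) :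
    PySem.List.min? (c :: t) (pvRank out) = some (pvPick out c t) := by
  induction t generalizing c with
  | nil => rfl
  | cons x r ih =>
    have hx := ih x
    have hc := ih c
    simp only [PySem.List.min?, List.foldl_cons] at hx hc ⊢
    by_cases h : pvRank out x < pvRank out c
    · rw [if_pos h, hx]; simp [pvPick, h]
    · rw [if_neg h, hc]; simp [pvPick, h]

theorem pick_char (out : String) (cfgs : List (List (String × String))) (m : List (String × String)) :
    pvPick out m cfgs =
      if pvRank out m = 0 then m
      else
        match pvFirstRank out 0 cfgs with
        | some c => c
        | none =>
          if pvRank out m = 1 then m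
          else
            match pvFirstRank out 1 cfgs with
            | some c => c
            | none => m := by
  induction cfgs generalizing m with
  | nil =>
    rcases pvRank_cases out m with h | h | h <;> simp [pvPick, pvFirstRank, h]
  | cons x r ih =>
    rcases pvRank_cases out m with h | h | h <;>
      rcases pvRank_cases out x with g | g | g <;>
        simp [pvPick, pvFirstRank, h, g, ih]

-- A's loops compute firstRank 0 / firstRank 1
theorem loopA_out (out : String) (cfgs : List (List (String × String))) :
    pvLoopA out cfgs = pvFirstRank out 0 cfgs := by
  induction cfgs with
  | nil => rfl
  | cons x r ih =>
    by_cases h : (PySem.Dict.mk x).get? "name" = some out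
    · simp [pvLoopA, pvFirstRank, pvRank, h]
    · by_cases hd : (PySem.Dict.mk x).get? "name" = some "default" <;>
        simp [pvLoopA, pvFirstRank, pvRank, h, hd, ih]

theorem loopA_default (out : String) (cfgs : List (List (String × String)))
    (hnone : pvFirstRank out 0 cfgs = none) :
    pvLoopA "default" cfgs = pvFirstRank out 1 cfgs := by
  induction cfgs with
  | nil => rfl
  | cons x r ih =>
    by_cases h : (PySem.Dict.mk x).get? "name" = some out
    · simp [pvFirstRank, pvRank, h] at hnone
    · have h0 : pvRank out x ≠ 0 := by unfold pvRank; rw [if_neg h]; split_ifs <;> simp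
      simp [pvFirstRank, h0] at hnone
      by_cases hd : (PySem.Dict.mk x).get? "name" = some "default"
      · have hne : ¬ ("default" = out) := fun e => h (e ▸ hd)
        simp [pvLoopA, pvFirstRank, pvRank, hd, hne]
      · simp [pvLoopA, pvFirstRank, pvRank, h, hd, hnone, ih]

-- ===== VERDICT (by name: the statement is the Claim_ definition above) =====
theorem match_monitor_config_spec : Claim_equal_match_monitor_config := by
  intro output_name configs _ hpre
  unfold Spec_match_monitor_config match_monitor_config match_monitor_config_alt
  obtain ⟨c, t, rfl⟩ : ∃ c t, configs = c :: t := by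
    cases configs with
    | nil => exact absurd rfl hpre
    | cons c t => exact ⟨c, t, rfl⟩
  rw [min?_cons_eq_pick, loopA_out, pick_char]
  rcases pvRank_cases output_name c with h | h | h
  · have hg : (PySem.Dict.mk c).get? "name" = some output_name := by
      by_contra hc
      unfold pvRank at h; rw [if_neg hc] at h; split_ifs at h <;> omega
    simp [pvFirstRank, h, hg]
  · have hne0 : pvRank output_name c ≠ 0 := by omega
    rw [show pvFirstRank output_name 0 (c :: t) = pvFirstRank output_name 0 t from by
      simp [pvFirstRank, hne0]]
    rw [h]
    norm_num
    cases hf : pvFirstRank output_name 0 t with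
    | some d => simp
    | none =>
      have hnone : pvFirstRank output_name 0 (c :: t) = none := by
        simp [pvFirstRank, hne0, hf]
      rw [loopA_default output_name _ hnone]
      have h1 : pvFirstRank output_name 1 (c :: t) = some c := by simp [pvFirstRank, h]
      simp [h1]
  · have hne0 : pvRank output_name c ≠ 0 := by omega
    have hne1 : pvRank output_name c ≠ 1 := by omega
    rw [show pvFirstRank output_name 0 (c :: t) = pvFirstRank output_name 0 t from by
      simp [pvFirstRank, hne0]]
    rw [h]
    norm_num
    cases hf : pvFirstRank output_name 0 t with
    | some d => simp
    | none =>
      have hnone : pvFirstRank output_name 0 (c :: t) = none := by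
        simp [pvFirstRank, hne0, hf]
      rw [loopA_default output_name _ hnone]
      rw [show pvFirstRank output_name 1 (c :: t) = pvFirstRank output_name 1 t from by
        simp [pvFirstRank, hne1]]
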